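-- pv_equiv track=rewrite | github.com/huajianduzhuo-code/FGG-music-code | data/song_analysis_utils/read_file.py | create_string
-- ===== SOURCE A (Python) =====
-- def create_string(num):
--     if num < 8:
--         return f"A{num}"
--     result = ""
--     while num >= 16:
--         result += "A8B8"
--         num -= 16
--     if num > 0:
--         if num <= 8:
--             result += f"A{num}"
--         else:
--             result += "A8"
--             num -= 8
--             result += f"B{num}"
--     return result
-- ===== SOURCE B (Python) =====
-- def create_string(num):
--     result = ""
--     i = 0
--     while num >= 8:
--         result += ("A" if i % 2 == 0 else "B") + "8"
--         num -= 8
--         i += 1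
--     if num > 0 or i == 0:
--         result += ("A" if i % 2 == 0 else "B") + str(num)
--     return result
-- ===== Notes on version B (the rewrite author's own statement) =====
-- stated objective: simpler
-- what changed: Replaces the num<8 early return, the 16-step A8B8 loop and the nested remainder branches by a single 8-step loop with a parity index choosing the letter, plus one uniform remainder chunk.
import Mathlib
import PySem

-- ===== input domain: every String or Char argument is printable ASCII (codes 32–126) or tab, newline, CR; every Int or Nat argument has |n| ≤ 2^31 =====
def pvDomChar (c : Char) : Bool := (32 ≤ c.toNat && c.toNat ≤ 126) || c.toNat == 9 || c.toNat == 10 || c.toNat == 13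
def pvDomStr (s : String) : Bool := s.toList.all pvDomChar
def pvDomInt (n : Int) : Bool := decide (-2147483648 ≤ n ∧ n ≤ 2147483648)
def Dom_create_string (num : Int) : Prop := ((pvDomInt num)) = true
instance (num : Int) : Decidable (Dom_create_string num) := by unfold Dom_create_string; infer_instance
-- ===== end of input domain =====

-- B replaces A's early return, 16-step loop and nested remainder branches by one 8-step loop
-- with a parity index (simpler decomposition, same cost).

-- ===== PORT A =====
-- the 'while num >= 16' loop followed by the remainder branch
def csA_loop (num : Int) (result : String) : String :=
  if 16 ≤ num then
    csA_loop (num - 16) (result ++ "A8B8")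
  else if 0 < num then
    if num ≤ 8 then result ++ "A" ++ PySem.Int.toStr num
    else (result ++ "A8") ++ "B" ++ PySem.Int.toStr (num - 8)
  else result
termination_by num.toNat
decreasing_by omega

def create_string (num : Int) : String :=
  if num < 8 then "A" ++ PySem.Int.toStr num
  else csA_loop num ""

-- ===== PORT B =====
-- the 'while num >= 8' loop with parity index i, followed by the remainder chunk
def csB_loop (num : Int) (i : Int) (result : String) : String :=
  if 8 ≤ num then
    csB_loop (num - 8) (i + 1) (result ++ (if PySem.Int.mod i 2 = 0 then "A" else "B") ++ "8")
  else if 0 < num ∨ i = 0 then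
    result ++ (if PySem.Int.mod i 2 = 0 then "A" else "B") ++ PySem.Int.toStr num
  else result
termination_by num.toNat
decreasing_by omega

def create_string_alt (num : Int) : String := csB_loop num 0 ""

-- ===== PRECONDITION & SPEC =====
def Spec_create_string (num : Int) (out : String) : Prop := out = create_string_alt num
instance (num : Int) (out : String) : Decidable (Spec_create_string num out) := by unfold Spec_create_string; infer_instance

-- ===== CLAIM (what is proved, stated in full; the proofs are below) =====
def Claim_equal_create_string : Prop := ∀ (num : Int), Dom_create_string num → Spec_create_string num (create_string num)

-- ===== LEMMAS AND PROOFS =====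

theorem mod2_emod (i : Int) : PySem.Int.mod i 2 = i % 2 :=
  PySem.Int.mod_eq_emod_of_pos (by norm_num)

theorem loops_eq (n : Nat) : ∀ (num i : Int), num.toNat = n → 0 ≤ i →
    PySem.Int.mod i 2 = 0 → (i = 0 → 8 ≤ num) → ∀ r,
    csA_loop num r = csB_loop num i r := by
  induction n using Nat.strong_induction_on with
  | _ n ih =>
    intro num i hn hi hev h0 r
    rw [mod2_emod] at hev
    have hodd : PySem.Int.mod (i + 1) 2 ≠ 0 := by rw [mod2_emod]; omega
    by_cases h16 : 16 ≤ num
    · -- A appends "A8B8"; B runs two iterations appending "A8" then "B8"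
      rw [csA_loop, if_pos h16]
      rw [csB_loop, if_pos (by omega : (8:Int) ≤ num),
        if_pos (show PySem.Int.mod i 2 = 0 by rw [mod2_emod]; omega)]
      rw [csB_loop, if_pos (by omega : (8:Int) ≤ num - 8), if_neg hodd]
      rw [show num - 8 - 8 = num - 16 from by ring, show i + 1 + 1 = i + 2 from by ring]
      rw [← ih (num - 16).toNat (by omega) (num - 16) (i + 2) rfl (by omega)
        (by rw [mod2_emod]; omega) (by omega) (r ++ "A" ++ "8" ++ "B" ++ "8")]
      have : r ++ "A8B8" = r ++ "A" ++ "8" ++ "B" ++ "8" := by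
        simp only [String.append_assoc]; rfl
      rw [this]
    · rw [csA_loop, if_neg h16]
      by_cases h8 : 8 ≤ num
      · -- 8 ≤ num < 16 : B runs exactly one more iteration
        rw [if_pos (by omega : (0:Int) < num)]
        rw [csB_loop, if_pos h8,
          if_pos (show PySem.Int.mod i 2 = 0 by rw [mod2_emod]; omega)]
        rw [csB_loop, if_neg (by omega : ¬ (8:Int) ≤ num - 8), if_neg hodd]
        by_cases hle : num ≤ 8
        · have hnum8 : num = 8 := by omega
          rw [if_pos hle, if_neg (by omega : ¬ ((0:Int) < num - 8 ∨ i + 1 = 0)), hnum8]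
          simp only [String.append_assoc]; rfl
        · rw [if_neg hle, if_pos (Or.inl (by omega) : (0:Int) < num - 8 ∨ i + 1 = 0)]
          simp only [String.append_assoc]
          rfl
      · -- num < 8 : both loops are done
        rw [csB_loop, if_neg h8]
        by_cases hpos : (0:Int) < num
        · rw [if_pos hpos, if_pos (by omega : num ≤ 8),
            if_pos (Or.inl hpos : (0:Int) < num ∨ i = 0),
            if_pos (show PySem.Int.mod i 2 = 0 by rw [mod2_emod]; omega)]
        · rw [if_neg hpos, if_neg (by omega : ¬ ((0:Int) < num ∨ i = 0))]

-- ===== VERDICT (by name: the statement is the Claim_ definition above) =====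
theorem create_string_spec : Claim_equal_create_string := by
  intro num _
  show create_string num = create_string_alt num
  unfold create_string create_string_alt
  by_cases h : num < 8
  · rw [csB_loop]
    rw [if_neg (by omega : ¬ (8:Int) ≤ num), if_pos (Or.inr rfl : 0 < num ∨ (0:Int) = 0),
      if_pos (by rfl : PySem.Int.mod 0 2 = 0), if_pos h]
    rfl
  · rw [if_neg h]
    exact loops_eq num.toNat num 0 rfl le_rfl rfl (fun _ => by omega) ""
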